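-- pv_equiv track=rewrite | github.com/EdmundOgban/Mjollnir | core/mixins.py | _join_args
-- ===== SOURCE A (Python) =====
-- def _join_args(args):
--     L = []
--     space_found = False
--     for arg in map(str, args):
--         if not space_found and " " in arg:
--             L.append(f":{arg}")
--             space_found = True
--         else:
--             L.append(arg)
--
--     return " ".join(L) or None
-- ===== SOURCE B (Python) =====
-- def _join_args(args):
--     strs = [str(a) for a in args]
--     # character offset (within the plain join) where the first
--     # space-containing argument starts; None if there is none
--     offset = None
--     acc = 0
--     for a in strs:
--         if " " in a:
--             offset = acc
--             break
--         acc += len(a) + 1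
--     j = " ".join(strs)
--     if offset is None:
--         return j or None
--     return j[:offset] + ":" + j[offset:]
-- ===== Notes on version B (the rewrite author's own statement) =====
-- stated objective: alternative
-- what changed: Instead of A's flag-carrying loop that rebuilds the list with a ':'-prefixed element and joins it, B joins the untouched list once, computes arithmetically the character offset where the first space-containing argument starts, and inserts ':' there by a single string slice-and-concatenate.
import Mathlib
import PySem

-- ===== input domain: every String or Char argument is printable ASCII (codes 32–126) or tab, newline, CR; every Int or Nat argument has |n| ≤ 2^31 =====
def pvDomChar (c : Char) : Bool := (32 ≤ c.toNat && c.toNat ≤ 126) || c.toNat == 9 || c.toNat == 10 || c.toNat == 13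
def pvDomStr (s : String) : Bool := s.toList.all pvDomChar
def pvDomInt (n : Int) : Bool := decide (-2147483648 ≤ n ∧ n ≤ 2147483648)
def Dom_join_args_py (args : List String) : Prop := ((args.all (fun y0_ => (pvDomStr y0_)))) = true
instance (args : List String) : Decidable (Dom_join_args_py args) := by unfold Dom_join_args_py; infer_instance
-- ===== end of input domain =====

-- B replaces A's flag-carrying list-rebuilding loop by: join the untouched list once, compute the
-- character offset of the first space-containing argument arithmetically, and insert ':' there by
-- one string slice-and-concatenate (alternative algorithm, same cost).

-- ===== PORT A =====
-- A's loop: accumulate the list L and the space_found flag; map(str, args) is the identity on strings; then " ".join(L) or None.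
def join_args_py (args : List String) : Option String :=
  let st := args.foldl
    (fun (acc : List String × Bool) arg =>
      if !acc.2 && PySem.Str.isIn " " arg then (acc.1 ++ [":" ++ arg], true)
      else (acc.1 ++ [arg], acc.2))
    ([], false)
  let j := PySem.Str.join " " st.1
  if j = "" then none else some j

-- ===== PORT B =====
-- B's offset loop (for … break): acc += len(a) + 1 until the first space-containing string
-- (a.toList.length is exactly Python's len(a), cf. PySem.Str.len).
def findOffset : List String → Nat → Option Nat
  | [], _ => none
  | a :: t, acc =>
    if PySem.Str.isIn " " a then some acc
    else findOffset t (acc + a.toList.length + 1)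

-- B: join once, then insert ':' at the computed character offset via j[:offset] + ":" + j[offset:].
def join_args_py_alt (args : List String) : Option String :=
  let strs := args
  let offset := findOffset strs 0
  let j := PySem.Str.join " " strs
  match offset with
  | none => if j = "" then none else some j
  | some k =>
      some (PySem.Str.slice j none (some (k : Int)) ++ ":" ++ PySem.Str.slice j (some (k : Int)) none)

-- ===== PRECONDITION & SPEC =====
def Spec_join_args_py (args : List String) (out : Option String) : Prop := out = join_args_py_alt args
instance (args : List String) (out : Option String) : Decidable (Spec_join_args_py args out) := by unfold Spec_join_args_py; infer_instance

-- ===== CLAIM (what is proved, stated in full; the proofs are below) =====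
def Claim_equal_join_args_py : Prop := ∀ (args : List String), Dom_join_args_py args → Spec_join_args_py args (join_args_py args)

-- ===== LEMMAS AND PROOFS =====

-- the list A's loop produces: the input with its first space-containing element ':'-prefixed
def markFirst : List String → List String
  | [] => []
  | h :: t => if PySem.Str.isIn " " h then (":" ++ h) :: t else h :: markFirst t

-- once the flag is set, A's loop just appends
lemma foldA_true (l : List String) (acc : List String) :
    l.foldl
      (fun (acc : List String × Bool) arg =>
        if !acc.2 && PySem.Str.isIn " " arg then (acc.1 ++ [":" ++ arg], true)
        else (acc.1 ++ [arg], acc.2))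
      (acc, true) = (acc ++ l, true) := by
  induction l generalizing acc with
  | nil => simp
  | cons a t ih =>
    rw [List.foldl_cons]
    rw [show (if !((acc, true) : List String × Bool).2 && PySem.Str.isIn " " a
          then (((acc, true) : List String × Bool).1 ++ [":" ++ a], true)
          else (((acc, true) : List String × Bool).1 ++ [a], ((acc, true) : List String × Bool).2))
        = ((acc ++ [a], true) : List String × Bool) from rfl]
    rw [ih]
    simp

-- with the flag unset, A's loop produces the marked list
lemma foldA_false (l : List String) (acc : List String) :
    (l.foldl
      (fun (acc : List String × Bool) arg =>
        if !acc.2 && PySem.Str.isIn " " arg then (acc.1 ++ [":" ++ arg], true)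
        else (acc.1 ++ [arg], acc.2))
      (acc, false)).1 = acc ++ markFirst l := by
  induction l generalizing acc with
  | nil => simp [markFirst]
  | cons a t ih =>
    rw [List.foldl_cons]
    by_cases h : PySem.Str.isIn " " a = true
    · have h' : PySem.Chars.isIn [' '] a.toList = true := by simpa using h
      rw [show (if !((acc, false) : List String × Bool).2 && PySem.Str.isIn " " a
            then (((acc, false) : List String × Bool).1 ++ [":" ++ a], true)
            else (((acc, false) : List String × Bool).1 ++ [a], ((acc, false) : List String × Bool).2))
          = ((acc ++ [":" ++ a], true) : List String × Bool) from by simp [h']]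
      rw [foldA_true]
      simp [markFirst, h']
    · have h' : PySem.Chars.isIn [' '] a.toList = false := by simpa using h
      rw [show (if !((acc, false) : List String × Bool).2 && PySem.Str.isIn " " a
            then (((acc, false) : List String × Bool).1 ++ [":" ++ a], true)
            else (((acc, false) : List String × Bool).1 ++ [a], ((acc, false) : List String × Bool).2))
          = ((acc ++ [a], false) : List String × Bool) from by simp [h']]
      rw [ih]
      simp [markFirst, h']

-- the accumulator only shifts the result
lemma findOffset_shift (l : List String) (acc : Nat) :
    findOffset l acc = (findOffset l 0).map (· + acc) := by
  induction l generalizing acc with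
  | nil => simp [findOffset]
  | cons a t ih =>
    simp only [findOffset]
    by_cases h : PySem.Str.isIn " " a = true
    · have h' : PySem.Chars.isIn [' '] a.toList = true := by simpa using h
      simp [h']
    · rw [if_neg h, if_neg h]
      rw [ih (acc + a.toList.length + 1), ih (0 + a.toList.length + 1)]
      cases findOffset t 0 with
      | none => rfl
      | some m =>
        simp only [Option.map_some, Option.some.injEq]
        omega

-- no offset: no element contains a space, A's marked list is the input unchanged
lemma markFirst_of_none (l : List String) (h : findOffset l 0 = none) : markFirst l = l := by
  induction l with
  | nil => rfl
  | cons a t ih =>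
    simp only [findOffset] at h
    by_cases ha : PySem.Str.isIn " " a = true
    · have ha' : PySem.Chars.isIn [' '] a.toList = true := by simpa using ha
      simp [ha'] at h
    · have ha' : PySem.Chars.isIn [' '] a.toList = false := by simpa using ha
      rw [if_neg ha, findOffset_shift, Option.map_eq_none_iff] at h
      rw [show markFirst (a :: t) = a :: markFirst t from by simp [markFirst, ha'], ih h]

-- nonempty-tail form of Chars.join
lemma join_cons_ne (sep p : List Char) (rest : List (List Char)) (h : rest ≠ []) :
    PySem.Chars.join sep (p :: rest) = p ++ sep ++ PySem.Chars.join sep rest := by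
  cases rest with
  | nil => exact absurd rfl h
  | cons q r => exact PySem.Chars.join_cons_cons sep p q r

-- inserting ':' at position m of x, seen after a fixed prefix p
lemma insert_shift (p x : List Char) (m : Nat) :
    p ++ (x.take m ++ ':' :: x.drop m)
      = (p ++ x).take (p.length + m) ++ ':' :: (p ++ x).drop (p.length + m) := by
  simp [List.take_append, List.drop_append, List.take_of_length_le, List.drop_of_length_le]

-- the offset points at the first space-containing element: the joined marked list is the plain
-- join with ':' inserted at character position k
lemma join_markFirst_eq (l : List String) (k : Nat) (hk : findOffset l 0 = some k) :
    PySem.Chars.join [' '] ((markFirst l).map String.toList)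
      = (PySem.Chars.join [' '] (l.map String.toList)).take k
        ++ ':' :: (PySem.Chars.join [' '] (l.map String.toList)).drop k := by
  induction l generalizing k with
  | nil => simp [findOffset] at hk
  | cons a t ih =>
    by_cases ha : PySem.Str.isIn " " a = true
    · have ha' : PySem.Chars.isIn [' '] a.toList = true := by simpa using ha
      have hk0 : k = 0 := by simp [findOffset, ha'] at hk; omega
      subst hk0
      rw [show markFirst (a :: t) = (":" ++ a) :: t from by simp [markFirst, ha']]
      cases t with
      | nil =>
        simp [PySem.Chars.join, List.intercalate, String.toList_append]
      | cons b r =>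
        simp only [List.map_cons, List.take_zero, List.drop_zero, List.nil_append]
        rw [PySem.Chars.join_cons_cons, PySem.Chars.join_cons_cons]
        simp [String.toList_append]
    · have ha' : PySem.Chars.isIn [' '] a.toList = false := by simpa using ha
      have hshift : findOffset (a :: t) 0
          = (findOffset t 0).map (· + (0 + a.toList.length + 1)) := by
        simp only [findOffset]
        rw [if_neg ha]
        exact findOffset_shift t _
      rw [hshift] at hk
      cases hm : findOffset t 0 with
      | none => simp [hm] at hk
      | some m =>
        have hkm : k = m + (a.toList.length + 1) := by
          rw [hm] at hk
          simp only [Option.map_some, Option.some.injEq] at hk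
          omega
        have ht : t ≠ [] := by rintro rfl; simp [findOffset] at hm
        have hmt : markFirst t ≠ [] := by
          rintro hc
          cases t with
          | nil => exact ht rfl
          | cons b r => simp only [markFirst] at hc; split at hc <;> simp at hc
        rw [show markFirst (a :: t) = a :: markFirst t from by simp [markFirst, ha'],
          List.map_cons, List.map_cons]
        rw [join_cons_ne [' '] a.toList ((markFirst t).map String.toList) (by simpa using hmt)]
        rw [join_cons_ne [' '] a.toList (t.map String.toList) (by simpa using ht)]
        rw [ih m hm]
        rw [show k = (a.toList ++ [' ']).length + m from by
          simp only [List.length_append, List.length_cons, List.length_nil]; omega]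
        exact insert_shift (a.toList ++ [' ']) _ m

-- ===== VERDICT (by name: the statement is the Claim_ definition above) =====
theorem join_args_py_spec : Claim_equal_join_args_py := by
  intro args _
  show join_args_py args = join_args_py_alt args
  simp only [join_args_py, join_args_py_alt]
  rw [foldA_false args [], List.nil_append]
  cases hk : findOffset args 0 with
  | none => rw [markFirst_of_none args hk]
  | some k =>
    have hmain := join_markFirst_eq args k hk
    have hne : PySem.Str.join " " (markFirst args) ≠ "" := by
      intro hc
      have : (PySem.Str.join " " (markFirst args)).toList = [] := by rw [hc]; rfl
      rw [PySem.Str.toList_join] at this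
      rw [show (" " : String).toList = [' '] from rfl] at this
      rw [hmain] at this
      simp at this
    rw [if_neg hne]
    congr 1
    apply String.toList_injective
    rw [PySem.Str.toList_join]
    rw [show (" " : String).toList = [' '] from rfl]
    rw [hmain]
    simp only [String.toList_append, PySem.Str.toList_slice, PySem.Chars.slice_eq_listSlice,
      PySem.List.slice_to_natCast, PySem.List.slice_from_natCast, PySem.Str.toList_join]
    rw [show (":" : String).toList = [':'] from rfl]
    simp
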